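-- pv_equiv track=rewrite | github.com/Runarok/GeeksForGeeks-solutions | Difficulty: Basic/An Easy problem/an-easy-problem.py | easyProblem
-- ===== SOURCE A (Python) =====
-- def easyProblem(K, L, R, X, Y):
--     """
--     Determines if there exists a multiple of K within the range [L, R]
--     by multiplying K with values in the range [X, Y].
--
--     :param K: The base number to be multiplied.
--     :param L: The lower bound of the valid range.
--     :param R: The upper bound of the valid range.
--     :param X: The lower bound of the multiplier range.
--     :param Y: The upper bound of the multiplier range.
--     :return: 1 if a valid multiple exists, otherwise 0.
--     """
--
--     # Iterate through the given range [X, Y] to check multiples of K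
--     for multiplier in range(X, Y + 1):
--         if multiplier == 0:
--             continue  # Skip zero to avoid a trivial zero result
--
--         product = K * multiplier  # Compute the product
--
--         # Check if the product falls within the given range [L, R]
--         if L <= product <= R:
--             return 1  # Found a valid multiple, return success
--
--     return 0  # No valid multiple found within range
-- ===== SOURCE B (Python) =====
-- def easyProblem(K, L, R, X, Y):
--     # O(1): intersect the allowed multiplier interval (from L, R, K) with [X, Y],
--     # and check the intersection contains a nonzero integer.
--     if K == 0:
--         return 1 if (X <= Y and (X < 0 or Y > 0) and L <= 0 <= R) else 0
--     if K > 0: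
--         lo = -((-L) // K)   # ceil(L / K)
--         hi = R // K         # floor(R / K)
--     else:
--         lo = -((-R) // K)   # ceil(R / K)
--         hi = L // K         # floor(L / K)
--     lo = max(lo, X)
--     hi = min(hi, Y)
--     return 1 if (lo <= hi and (lo < 0 or hi > 0)) else 0
-- ===== Notes on version B (the rewrite author's own statement) =====
-- stated objective: faster
-- what changed: Replaced the linear scan over all multipliers in [X,Y] with an O(1) interval intersection: the multiplier range allowed by [L,R] and the sign of K is computed with ceiling/floor division and intersected with [X,Y], then checked for a nonzero element.
import Mathlib
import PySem

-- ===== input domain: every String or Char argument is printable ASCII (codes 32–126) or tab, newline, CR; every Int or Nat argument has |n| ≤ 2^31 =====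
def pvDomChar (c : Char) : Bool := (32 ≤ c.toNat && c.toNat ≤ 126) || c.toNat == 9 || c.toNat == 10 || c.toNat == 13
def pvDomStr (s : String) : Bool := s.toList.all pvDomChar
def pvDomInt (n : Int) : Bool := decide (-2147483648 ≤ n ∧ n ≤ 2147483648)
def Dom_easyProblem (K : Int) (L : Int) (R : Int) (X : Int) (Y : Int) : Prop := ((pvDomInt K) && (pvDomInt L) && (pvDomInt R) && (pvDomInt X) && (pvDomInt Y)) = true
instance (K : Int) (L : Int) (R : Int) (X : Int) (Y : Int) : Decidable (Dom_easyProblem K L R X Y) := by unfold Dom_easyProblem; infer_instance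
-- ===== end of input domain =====

-- B replaces A's linear scan over the multipliers in [X, Y] with an O(1)
-- interval intersection (allowed-multiplier range from L, R, K vs [X, Y]).

-- ===== PORT A =====
-- the 'for multiplier in range(X, Y+1)' loop with its early return
-- (iterated directly over the integers of the range, not a materialised list)
def easyLoopA (K : Int) (L : Int) (R : Int) (m : Int) (b : Int) : Int :=
  if _h : m < b then
    if m = 0 then easyLoopA K L R (m + 1) b
    else
      let product := K * m
      if L ≤ product ∧ product ≤ R then 1 else easyLoopA K L R (m + 1) b
  else 0
termination_by (b - m).toNat
decreasing_by all_goals omega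

def easyProblem (K : Int) (L : Int) (R : Int) (X : Int) (Y : Int) : Int :=
  easyLoopA K L R X (Y + 1)

-- ===== PORT B =====
def easyProblem_alt (K : Int) (L : Int) (R : Int) (X : Int) (Y : Int) : Int :=
  if K = 0 then
    if X ≤ Y ∧ (X < 0 ∨ 0 < Y) ∧ L ≤ 0 ∧ 0 ≤ R then 1 else 0
  else
    let lo := if 0 < K then -(PySem.Int.floordiv (-L) K) else -(PySem.Int.floordiv (-R) K)
    let hi := if 0 < K then PySem.Int.floordiv R K else PySem.Int.floordiv L K
    let lo' := max lo X
    let hi' := min hi Y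
    if lo' ≤ hi' ∧ (lo' < 0 ∨ 0 < hi') then 1 else 0

-- ===== PRECONDITION & SPEC =====
def Spec_easyProblem (K : Int) (L : Int) (R : Int) (X : Int) (Y : Int) (out : Int) : Prop := out = easyProblem_alt K L R X Y
instance (K : Int) (L : Int) (R : Int) (X : Int) (Y : Int) (out : Int) : Decidable (Spec_easyProblem K L R X Y out) := by unfold Spec_easyProblem; infer_instance

-- ===== CLAIM (what is proved, stated in full; the proofs are below) =====
def Claim_equal_easyProblem : Prop := ∀ (K : Int) (L : Int) (R : Int) (X : Int) (Y : Int), Dom_easyProblem K L R X Y → Spec_easyProblem K L R X Y (easyProblem K L R X Y)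

-- ===== LEMMAS AND PROOFS =====

-- A's loop returns only 0 or 1
theorem easyLoopA_zero_or_one (K L R m b : Int) :
    easyLoopA K L R m b = 0 ∨ easyLoopA K L R m b = 1 := by
  fun_induction easyLoopA <;> simp_all

-- A's loop returns 1 exactly when some element of the remaining range qualifies
theorem easyLoopA_eq_one_iff (K L R m b : Int) :
    easyLoopA K L R m b = 1 ↔
      ∃ x, m ≤ x ∧ x < b ∧ x ≠ 0 ∧ L ≤ K * x ∧ K * x ≤ R := by
  fun_induction easyLoopA
  case case1 =>
    rename_i hlt ih
    rw [ih]
    constructor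
    · rintro ⟨x, h1, h2, h3, h4⟩; exact ⟨x, by omega, h2, h3, h4⟩
    · rintro ⟨x, h1, h2, h3, h4⟩; exact ⟨x, by omega, h2, h3, h4⟩
  case case2 =>
    rename_i m hlt h0 prod hLR
    constructor
    · intro _; exact ⟨m, le_refl m, hlt, h0, hLR.1, hLR.2⟩
    · intro _; rfl
  case case3 =>
    rename_i m hlt h0 prod hLR ih
    rw [ih]
    constructor
    · rintro ⟨x, h1, h2, h3, h4⟩; exact ⟨x, by omega, h2, h3, h4⟩
    · rintro ⟨x, h1, h2, h3, h4, h5⟩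
      rcases eq_or_lt_of_le h1 with he | hgt
      · rw [← he] at h4 h5; exact absurd ⟨h4, h5⟩ hLR
      · exact ⟨x, by omega, h2, h3, h4, h5⟩
  case case4 =>
    rename_i m hge
    constructor
    · intro h; exact absurd h (by norm_num)
    · rintro ⟨x, h1, h2, _⟩; omega

-- interval intersection: existence of a nonzero integer in [lo0,hi0] ∩ [X,Y]
theorem exists_nonzero_mem_iff (lo0 hi0 X Y : Int) :
    (∃ m, (X ≤ m ∧ m ≤ Y) ∧ m ≠ 0 ∧ lo0 ≤ m ∧ m ≤ hi0) ↔
      (max lo0 X ≤ min hi0 Y ∧ (max lo0 X < 0 ∨ 0 < min hi0 Y)) := by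
  constructor
  · rintro ⟨m, ⟨hX, hY⟩, hm0, hlo, hhi⟩; omega
  · rintro ⟨hle, hd⟩
    rcases hd with h | h
    · exact ⟨max lo0 X, by omega, by omega, by omega, by omega⟩
    · exact ⟨min hi0 Y, by omega, by omega, by omega, by omega⟩

-- bracket characterisation of the allowed multipliers, K > 0
theorem bounds_pos (K L R m : Int) (hK : 0 < K) :
    (L ≤ K * m ∧ K * m ≤ R) ↔
      (-(PySem.Int.floordiv (-L) K) ≤ m ∧ m ≤ PySem.Int.floordiv R K) := by
  have h1 : -m ≤ PySem.Int.floordiv (-L) K ↔ (-m) * K ≤ -L :=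
    PySem.Int.le_floordiv_iff_mul_le hK
  have h2 : m ≤ PySem.Int.floordiv R K ↔ m * K ≤ R :=
    PySem.Int.le_floordiv_iff_mul_le hK
  rw [neg_le, h1, h2]
  constructor <;> rintro ⟨hl, hr⟩ <;> constructor <;> nlinarith

-- bracket characterisation of the allowed multipliers, K < 0
theorem bounds_neg (K L R m : Int) (hK : K < 0) :
    (L ≤ K * m ∧ K * m ≤ R) ↔
      (-(PySem.Int.floordiv (-R) K) ≤ m ∧ m ≤ PySem.Int.floordiv L K) := by
  have hK' : 0 < -K := by omega
  have e1 : PySem.Int.floordiv (-R) K = PySem.Int.floordiv R (-K) := by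
    rw [← PySem.Int.floordiv_neg_neg R (-K)]; simp
  have e2 : PySem.Int.floordiv L K = PySem.Int.floordiv (-L) (-K) := by
    rw [← PySem.Int.floordiv_neg_neg (-L) (-K)]; simp
  have h1 : -m ≤ PySem.Int.floordiv R (-K) ↔ (-m) * (-K) ≤ R :=
    PySem.Int.le_floordiv_iff_mul_le hK'
  have h2 : m ≤ PySem.Int.floordiv (-L) (-K) ↔ m * (-K) ≤ -L :=
    PySem.Int.le_floordiv_iff_mul_le hK'
  rw [e1, e2, neg_le, h1, h2]
  constructor <;> rintro ⟨hl, hr⟩ <;> constructor <;> nlinarith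

theorem alt_eq_one_iff (K L R X Y : Int) :
    easyProblem_alt K L R X Y = 1 ↔
      ∃ m, (X ≤ m ∧ m ≤ Y) ∧ m ≠ 0 ∧ L ≤ K * m ∧ K * m ≤ R := by
  unfold easyProblem_alt
  by_cases hK0 : K = 0
  · rw [if_pos hK0]
    subst hK0
    simp only [zero_mul]
    split_ifs with h
    · constructor
      · intro _
        rcases h with ⟨hXY, hd, hL, hR⟩
        rcases hd with hx | hy
        · exact ⟨X, ⟨le_refl X, hXY⟩, by omega, hL, hR⟩
        · exact ⟨Y, ⟨hXY, le_refl Y⟩, by omega, hL, hR⟩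
      · intro _; rfl
    · constructor
      · intro h'; exact absurd h' (by norm_num)
      · rintro ⟨m, ⟨hX, hY⟩, hm0, hL, hR⟩
        exact absurd ⟨by omega, by omega, hL, hR⟩ h
  · rw [if_neg hK0]
    rcases lt_or_gt_of_ne hK0 with hK | hK
    · simp only [if_neg (by omega : ¬ 0 < K)]
      have hb : ∀ m : Int, (L ≤ K * m ∧ K * m ≤ R) ↔
          (-(PySem.Int.floordiv (-R) K) ≤ m ∧ m ≤ PySem.Int.floordiv L K) :=
        fun m => bounds_neg K L R m hK
      rw [show (∃ m, (X ≤ m ∧ m ≤ Y) ∧ m ≠ 0 ∧ L ≤ K * m ∧ K * m ≤ R) ↔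
          (∃ m, (X ≤ m ∧ m ≤ Y) ∧ m ≠ 0 ∧ -(PySem.Int.floordiv (-R) K) ≤ m ∧
            m ≤ PySem.Int.floordiv L K) from
        exists_congr fun m => by rw [hb m]]
      rw [exists_nonzero_mem_iff]
      split_ifs with h
      · exact ⟨fun _ => h, fun _ => rfl⟩
      · exact ⟨fun h1 => absurd h1 (by norm_num), fun hc => absurd hc h⟩
    · simp only [if_pos hK]
      have hb : ∀ m : Int, (L ≤ K * m ∧ K * m ≤ R) ↔
          (-(PySem.Int.floordiv (-L) K) ≤ m ∧ m ≤ PySem.Int.floordiv R K) :=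
        fun m => bounds_pos K L R m hK
      rw [show (∃ m, (X ≤ m ∧ m ≤ Y) ∧ m ≠ 0 ∧ L ≤ K * m ∧ K * m ≤ R) ↔
          (∃ m, (X ≤ m ∧ m ≤ Y) ∧ m ≠ 0 ∧ -(PySem.Int.floordiv (-L) K) ≤ m ∧
            m ≤ PySem.Int.floordiv R K) from
        exists_congr fun m => by rw [hb m]]
      rw [exists_nonzero_mem_iff]
      split_ifs with h
      · exact ⟨fun _ => h, fun _ => rfl⟩
      · exact ⟨fun h1 => absurd h1 (by norm_num), fun hc => absurd hc h⟩

theorem ite01 (p : Prop) [Decidable p] :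
    (if p then (1 : Int) else 0) = 0 ∨ (if p then (1 : Int) else 0) = 1 := by
  split_ifs <;> simp

theorem alt_zero_or_one (K L R X Y : Int) :
    easyProblem_alt K L R X Y = 0 ∨ easyProblem_alt K L R X Y = 1 := by
  unfold easyProblem_alt
  by_cases hK : K = 0
  · rw [if_pos hK]; exact ite01 _
  · rw [if_neg hK]; exact ite01 _

theorem a_eq_one_iff (K L R X Y : Int) :
    easyProblem K L R X Y = 1 ↔
      ∃ m, (X ≤ m ∧ m ≤ Y) ∧ m ≠ 0 ∧ L ≤ K * m ∧ K * m ≤ R := by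
  unfold easyProblem
  rw [easyLoopA_eq_one_iff]
  constructor
  · rintro ⟨m, h1, h2, hprops⟩; exact ⟨m, ⟨h1, by omega⟩, hprops⟩
  · rintro ⟨m, ⟨hX, hY⟩, hprops⟩; exact ⟨m, hX, by omega, hprops⟩

-- ===== VERDICT (by name: the statement is the Claim_ definition above) =====
theorem easyProblem_spec : Claim_equal_easyProblem := by
  intro K L R X Y _
  unfold Spec_easyProblem
  by_cases hE : ∃ m, (X ≤ m ∧ m ≤ Y) ∧ m ≠ 0 ∧ L ≤ K * m ∧ K * m ≤ R
  · rw [(a_eq_one_iff K L R X Y).mpr hE, (alt_eq_one_iff K L R X Y).mpr hE]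
  · have ha := easyLoopA_zero_or_one K L R X (Y + 1)
    have hb := alt_zero_or_one K L R X Y
    have ha1 := a_eq_one_iff K L R X Y
    have hb1 := alt_eq_one_iff K L R X Y
    unfold easyProblem at *
    rcases ha with h | h <;> rcases hb with h' | h' <;>
      first
        | (exact absurd (ha1.mp h) hE)
        | (exact absurd (hb1.mp h') hE)
        | (rw [h, h'])
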